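-- pv_equiv track=rewrite | github.com/RozanskiT/Crypto2019 | lab2/rc4.py | ksa_rs
-- ===== SOURCE A (Python) =====
-- def ksa_rs(key, n, t):
--     s = list(range(n))
--     bit_key = str2bin(key)
--     l = len(bit_key)
--     for r in range(t):
--         top = []
--         bot = []
--         for i in range(n):
--             if bit_key[(r * n + i) % l] == '0':
--                 top.append(s[i])
--             else:
--                 bot.append(s[i])
--         top.extend(bot)
--         s = top.copy()
--     return s
--
-- def str2bin(key):
--     return ''.join(format(ord(x), '08b') for x in key)
-- ===== SOURCE B (Python) =====
-- from math import gcd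
--
-- def str2bin(key):
--     return ''.join(format(ord(x), '08b') for x in key)
--
-- def ksa_rs(key, n, t):
--     # Each round applies a fixed index permutation that depends only on (r*n) % l,
--     # which cycles with period p = l // gcd(n, l).  Compose the permutations of one
--     # period (only when t >= p) and raise the composite to the needed power by
--     # binary exponentiation; finish with the t % p remaining rounds.
--     if t <= 0 or n <= 0:
--         return list(range(n))
--     bit_key = str2bin(key)
--     l = len(bit_key)
--
--     def perm(o):
--         zeros = [j for j in range(n) if bit_key[(o + j) % l] == '0']
--         ones = [j for j in range(n) if bit_key[(o + j) % l] != '0']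
--         return zeros + ones
--
--     def compose(a, b):
--         return [a[j] for j in b]
--
--     p = l // gcd(n, l)
--     q, rem = divmod(t, p)
--     ident = list(range(n))
--     if q > 0:
--         Q = ident
--         for j in range(p):
--             Q = compose(Q, perm((j * n) % l))
--         P = ident
--         base = Q
--         e = q
--         while e > 0:
--             if e & 1:
--                 P = compose(P, base)
--             base = compose(base, base)
--             e >>= 1
--     else:
--         P = ident
--     R = ident
--     for j in range(rem):
--         R = compose(R, perm((j * n) % l))
--     return compose(P, R)
-- ===== Notes on version B (the rewrite author's own statement) =====
-- stated objective: alternative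
-- what changed: Each round is a fixed index permutation depending only on (r*n) mod l, which cycles with period p = l/gcd(n,l); B composes permutations instead of shuffling values, composes one period only when t >= p and raises it to the needed power by binary exponentiation, then applies the t mod p remaining rounds.
import Mathlib
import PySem

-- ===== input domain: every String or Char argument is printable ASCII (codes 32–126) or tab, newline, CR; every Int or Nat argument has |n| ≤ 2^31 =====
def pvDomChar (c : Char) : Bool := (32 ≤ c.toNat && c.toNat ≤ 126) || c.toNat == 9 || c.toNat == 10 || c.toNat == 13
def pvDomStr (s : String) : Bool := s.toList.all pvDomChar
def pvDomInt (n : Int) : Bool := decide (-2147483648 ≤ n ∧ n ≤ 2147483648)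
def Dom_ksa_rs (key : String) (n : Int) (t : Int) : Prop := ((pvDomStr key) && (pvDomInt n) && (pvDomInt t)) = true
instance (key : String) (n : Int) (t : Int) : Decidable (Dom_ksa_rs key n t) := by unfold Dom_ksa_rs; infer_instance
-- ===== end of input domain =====

-- B replaces A's t-round value shuffling by composing per-round index permutations,
-- exploiting their period p = l/gcd(n,l) with binary exponentiation once t exceeds p.

-- ===== PORT A =====
-- str2bin(key): 8-bit big-endian binary expansion of each character (exact for ASCII codes < 256)
def str2binL (key : String) : List Char :=
  key.toList.flatMap (fun c => (List.range 8).map (fun k => if Nat.testBit c.toNat (7 - k) then '1' else '0'))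

def ksa_rs (key : String) (n : Int) (t : Int) : List Int :=
  let bits := str2binL key
  let l : Int := (bits.length : Int)
  (PySem.List.pyRange 0 t 1).foldl (fun s r =>
    let tb := (PySem.List.pyRange 0 n 1).foldl (fun (tb : List Int × List Int) i =>
      if (PySem.List.pyGet? bits (PySem.Int.mod (r * n + i) l)).getD ' ' == '0'
      then (tb.1 ++ [(PySem.List.pyGet? s i).getD 0], tb.2)
      else (tb.1, tb.2 ++ [(PySem.List.pyGet? s i).getD 0]))
      (([] : List Int), ([] : List Int))
    tb.1 ++ tb.2) (PySem.List.pyRange 0 n 1)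

-- ===== PORT B =====
-- compose(a, b) = [a[j] for j in b]
def composeB (a b : List Int) : List Int := b.map (fun j => (PySem.List.pyGet? a j).getD 0)

-- perm(o): stable partition of range(n) by the key bit at (o + j) % l
def permB (bits : List Char) (l n o : Int) : List Int :=
  ((PySem.List.pyRange 0 n 1).filter
      (fun j => (PySem.List.pyGet? bits (PySem.Int.mod (o + j) l)).getD ' ' == '0'))
    ++ ((PySem.List.pyRange 0 n 1).filter
      (fun j => !((PySem.List.pyGet? bits (PySem.Int.mod (o + j) l)).getD ' ' == '0')))

-- binary exponentiation loop (while e > 0: …)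
def powB (P base : List Int) (e : Nat) : List Int :=
  if h : e = 0 then P
  else powB (if e % 2 = 1 then composeB P base else P) (composeB base base) (e / 2)
  termination_by e
  decreasing_by exact Nat.div_lt_self (Nat.pos_of_ne_zero h) one_lt_two

def ksa_rs_alt (key : String) (n : Int) (t : Int) : List Int :=
  if t ≤ 0 ∨ n ≤ 0 then PySem.List.pyRange 0 n 1
  else
    let bits := str2binL key
    let l : Int := (bits.length : Int)
    let p : Int := PySem.Int.floordiv l (Int.gcd n l)
    match PySem.Int.divmod? t p with
    | none => PySem.List.pyRange 0 n 1   -- Python raises here (key = ""); outside Pre_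
    | some (q, rem) =>
      let ident := PySem.List.pyRange 0 n 1
      let P :=
        if 0 < q then
          powB ident
            ((PySem.List.pyRange 0 p 1).foldl
              (fun Q j => composeB Q (permB bits l n (PySem.Int.mod (j * n) l))) ident)
            q.toNat
        else ident
      let R := (PySem.List.pyRange 0 rem 1).foldl
        (fun R j => composeB R (permB bits l n (PySem.Int.mod (j * n) l))) ident
      composeB P R

-- ===== PRECONDITION & SPEC =====
-- Pre_ excludes only the inputs where A raises ZeroDivisionError (empty key with
-- n > 0 and t > 0, so that `% l` divides by zero); B raises there as well.
def Pre_ksa_rs (key : String) (n : Int) (t : Int) : Prop := key = "" → (n ≤ 0 ∨ t ≤ 0)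
instance (key : String) (n : Int) (t : Int) : Decidable (Pre_ksa_rs key n t) := by
  unfold Pre_ksa_rs; infer_instance

def pvWitness_ksa_rs : String × Int × Int := ("k", 3, 5)

def Spec_ksa_rs (key : String) (n : Int) (t : Int) (out : List Int) : Prop := out = ksa_rs_alt key n t
instance (key : String) (n : Int) (t : Int) (out : List Int) : Decidable (Spec_ksa_rs key n t out) := by
  unfold Spec_ksa_rs; infer_instance

-- ===== CLAIM (what is proved, stated in full; the proofs are below) =====
def Claim_equal_ksa_rs : Prop := ∀ (key : String) (n : Int) (t : Int), Dom_ksa_rs key n t → Pre_ksa_rs key n t → Spec_ksa_rs key n t (ksa_rs key n t)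

-- ===== LEMMAS AND PROOFS =====

-- Nat-level model: index permutations, composition, chains of rounds
def castL (a : List Nat) : List Int := a.map Nat.cast

def bitp (bits : List Char) (m : Nat) : Bool := bits.getD (m % bits.length) ' ' == '0'

def permN (bits : List Char) (N o : Nat) : List Nat :=
  (List.range N).filter (fun j => bitp bits (o + j))
    ++ (List.range N).filter (fun j => !bitp bits (o + j))

def compN (a b : List Nat) : List Nat := b.map (fun j => a.getD j 0)

def chainS (bits : List Char) (N s m : Nat) : List Nat :=
  (List.range m).foldl (fun a r => compN a (permN bits N ((s + r) * N))) (List.range N)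

def cpowN (N : Nat) (b : List Nat) : Nat → List Nat
  | 0 => List.range N
  | e + 1 => compN (cpowN N b e) b

def powN (P base : List Nat) (e : Nat) : List Nat :=
  if h : e = 0 then P
  else powN (if e % 2 = 1 then compN P base else P) (compN base base) (e / 2)
  termination_by e
  decreasing_by exact Nat.div_lt_self (Nat.pos_of_ne_zero h) one_lt_two

def GoodN (N : Nat) (a : List Nat) : Prop := a.length = N ∧ ∀ x ∈ a, x < N

lemma good_range (N : Nat) : GoodN N (List.range N) :=
  ⟨List.length_range, fun x hx => List.mem_range.mp hx⟩

lemma getD_lt_of_good {N : Nat} {a : List Nat} (ha : GoodN N a) {j : Nat} (hj : j < N) :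
    a.getD j 0 < N := by
  have hjl : j < a.length := ha.1 ▸ hj
  rw [List.getD_eq_getElem a 0 hjl]
  exact ha.2 _ (List.getElem_mem hjl)

lemma good_compN {N : Nat} {a b : List Nat} (ha : GoodN N a) (hb : GoodN N b) :
    GoodN N (compN a b) := by
  refine ⟨by simp [compN, hb.1], ?_⟩
  intro x hx
  simp only [compN, List.mem_map] at hx
  obtain ⟨j, hj, rfl⟩ := hx
  exact getD_lt_of_good ha (hb.2 j hj)

lemma getD_compN {a b : List Nat} {j : Nat} (hj : j < b.length) :
    (compN a b).getD j 0 = a.getD (b.getD j 0) 0 := by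
  rw [List.getD_eq_getElem?_getD, compN, List.getElem?_map,
    List.getElem?_eq_getElem hj, List.getD_eq_getElem b 0 hj]
  rfl

lemma compN_assoc {N : Nat} (a : List Nat) {b c : List Nat} (hb : b.length = N)
    (hc : ∀ x ∈ c, x < N) : compN (compN a b) c = compN a (compN b c) := by
  simp only [compN, List.map_map]
  apply List.map_congr_left
  intro j hj
  have hjb : j < b.length := hb ▸ hc j hj
  show (compN a b).getD j 0 = a.getD ((fun j => b.getD j 0) j) 0
  exact getD_compN hjb

lemma compN_id_right {N : Nat} {a : List Nat} (ha : a.length = N) :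
    compN a (List.range N) = a := by
  apply List.ext_getElem (by simp [compN, ha])
  intro k h1 h2
  simp only [compN, List.getElem_map, List.getElem_range]
  rw [List.getD_eq_getElem a 0 h2]

lemma compN_id_left {N : Nat} {c : List Nat} (hc : ∀ x ∈ c, x < N) :
    compN (List.range N) c = c := by
  apply List.ext_getElem (by simp [compN])
  intro k h1 h2
  simp only [compN, List.getElem_map]
  rw [List.getD_eq_getElem _ 0 (by simpa using hc _ (List.getElem_mem h2)), List.getElem_range]

lemma good_permN (bits : List Char) (N o : Nat) : GoodN N (permN bits N o) := by
  constructor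
  · simp only [permN, List.length_append]
    have := (List.filter_append_perm (fun j => bitp bits (o + j)) (List.range N)).length_eq
    simpa using this
  · intro x hx
    simp only [permN, List.mem_append, List.mem_filter, List.mem_range] at hx
    rcases hx with h | h <;> exact h.1

lemma bitp_add_dvd {bits : List Char} {d : Nat} (h : bits.length ∣ d) (m : Nat) :
    bitp bits (m + d) = bitp bits m := by
  obtain ⟨c, rfl⟩ := h
  unfold bitp
  rw [Nat.add_mul_mod_self_left]

lemma permN_add_dvd {bits : List Char} (N : Nat) {d : Nat} (h : bits.length ∣ d) (o : Nat) :
    permN bits N (o + d) = permN bits N o := by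
  unfold permN
  congr 1 <;> apply List.filter_congr <;> intro j _ <;>
    rw [show o + d + j = (o + j) + d by omega, bitp_add_dvd h]

lemma permN_mod (bits : List Char) (N o : Nat) :
    permN bits N (o % bits.length) = permN bits N o := by
  unfold permN
  congr 1 <;> apply List.filter_congr <;> intro j _ <;>
    · unfold bitp; rw [Nat.mod_add_mod]

lemma chainS_succ (bits : List Char) (N s m : Nat) :
    chainS bits N s (m + 1) = compN (chainS bits N s m) (permN bits N ((s + m) * N)) := by
  simp [chainS, List.range_succ]

lemma good_chainS (bits : List Char) (N s m : Nat) : GoodN N (chainS bits N s m) := by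
  induction m with
  | zero => exact good_range N
  | succ m ih => rw [chainS_succ]; exact good_compN ih (good_permN bits N _)

lemma chainS_shift {bits : List Char} {N c : Nat} (h : bits.length ∣ c * N) (s m : Nat) :
    chainS bits N (s + c) m = chainS bits N s m := by
  induction m with
  | zero => rfl
  | succ m ih =>
      rw [chainS_succ, chainS_succ, ih]
      congr 1
      rw [show (s + c + m) * N = (s + m) * N + c * N by ring, permN_add_dvd N h]

lemma chainS_add (bits : List Char) (N s m k : Nat) :
    chainS bits N s (m + k) = compN (chainS bits N s m) (chainS bits N (s + m) k) := by
  induction k with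
  | zero => exact (compN_id_right (good_chainS bits N s m).1).symm
  | succ k ih =>
      rw [show m + (k + 1) = (m + k) + 1 by omega, chainS_succ, ih, chainS_succ,
        compN_assoc _ (good_chainS bits N (s + m) k).1 (good_permN bits N _).2,
        show s + (m + k) = s + m + k by omega]

lemma good_cpowN {N : Nat} {b : List Nat} (hb : GoodN N b) (e : Nat) :
    GoodN N (cpowN N b e) := by
  induction e with
  | zero => exact good_range N
  | succ e ih => exact good_compN ih hb

lemma cpowN_one {N : Nat} {b : List Nat} (hb : GoodN N b) : cpowN N b 1 = b :=
  compN_id_left hb.2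

lemma cpowN_add {N : Nat} {b : List Nat} (hb : GoodN N b) (i j : Nat) :
    cpowN N b (i + j) = compN (cpowN N b i) (cpowN N b j) := by
  induction j with
  | zero => exact (compN_id_right (good_cpowN hb i).1).symm
  | succ j ih =>
      rw [show i + (j + 1) = (i + j) + 1 by omega]
      show compN (cpowN N b (i + j)) b = _
      rw [ih, compN_assoc _ (good_cpowN hb j).1 hb.2]
      rfl

lemma cpowN_sq {N : Nat} {b : List Nat} (hb : GoodN N b) (k : Nat) :
    cpowN N (compN b b) k = cpowN N b (2 * k) := by
  induction k with
  | zero => rfl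
  | succ k ih =>
      show compN (cpowN N (compN b b) k) (compN b b) = _
      rw [ih, show 2 * (k + 1) = 2 * k + 2 by omega, cpowN_add hb,
        show (2 : Nat) = 1 + 1 by rfl, cpowN_add hb, cpowN_one hb]

lemma powN_eq {N : Nat} (e : Nat) {P b : List Nat} (hP : GoodN N P) (hb : GoodN N b) :
    powN P b e = compN P (cpowN N b e) := by
  induction e using Nat.strong_induction_on generalizing P b with
  | _ e ih =>
    rw [powN]
    by_cases h : e = 0
    · simp only [h, dif_pos]
      exact (compN_id_right hP.1).symm
    · rw [dif_neg h]
      have hbb : GoodN N (compN b b) := good_compN hb hb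
      have hP' : GoodN N (if e % 2 = 1 then compN P b else P) := by
        split_ifs
        · exact good_compN hP hb
        · exact hP
      rw [ih (e / 2) (Nat.div_lt_self (Nat.pos_of_ne_zero h) one_lt_two) hP' hbb,
        cpowN_sq hb]
      by_cases hodd : e % 2 = 1
      · rw [if_pos hodd,
          compN_assoc P hb.1 (good_cpowN hb (2 * (e / 2))).2]
        have : compN b (cpowN N b (2 * (e / 2))) = cpowN N b (1 + 2 * (e / 2)) := by
          rw [cpowN_add hb, cpowN_one hb]
        rw [this, show 1 + 2 * (e / 2) = e by omega]
      · rw [if_neg hodd, show 2 * (e / 2) = e by omega]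

lemma chain_decomp {bits : List Char} {N P : Nat} (hPN : bits.length ∣ P * N)
    (q rem : Nat) :
    chainS bits N 0 (q * P + rem)
      = compN (cpowN N (chainS bits N 0 P) q) (chainS bits N 0 rem) := by
  induction q with
  | zero => simpa using (compN_id_left (good_chainS bits N 0 rem).2).symm
  | succ q ih =>
      have hQ : GoodN N (chainS bits N 0 P) := good_chainS bits N 0 P
      rw [show (q + 1) * P + rem = P + (q * P + rem) by ring, chainS_add,
        chainS_shift (c := P) (by simpa using hPN), ih,
        ← compN_assoc _ (good_cpowN hQ q).1 (good_chainS bits N 0 rem).2]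
      congr 1
      have : compN (chainS bits N 0 P) (cpowN N (chainS bits N 0 P) q)
          = cpowN N (chainS bits N 0 P) (1 + q) := by
        rw [cpowN_add hQ, cpowN_one hQ]
      rw [this, show 1 + q = q + 1 by omega]
-- Bridges between the Int-level ports and the Nat model
lemma pyGetD_castL (a : List Nat) (j : Nat) :
    (PySem.List.pyGet? (castL a) (j : Int)).getD 0 = ((a.getD j 0 : Nat) : Int) := by
  rw [PySem.List.pyGet?_natCast, List.getD_eq_getElem?_getD, castL, List.getElem?_map]
  cases a[j]? <;> rfl

lemma pyGetD_map_cast (a : List Nat) (j : Nat) :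
    (PySem.List.pyGet? (List.map (Nat.cast : Nat → Int) a) (j : Int)).getD 0
      = ((a.getD j 0 : Nat) : Int) := pyGetD_castL a j

lemma composeB_cast (a b : List Nat) : composeB (castL a) (castL b) = castL (compN a b) := by
  simp only [composeB, compN, castL, List.map_map]
  apply List.map_congr_left
  intro j _
  exact pyGetD_castL a j

lemma castL_range (N : Nat) : castL (List.range N) = PySem.List.pyRange 0 (N : Int) 1 := by
  rw [PySem.List.pyRange_zero_natCast]; rfl

lemma bit_pred_cast (bits : List Char) (o j : Nat) :
    ((PySem.List.pyGet? bits (PySem.Int.mod ((o : Int) + (j : Int)) (bits.length : Int))).getD ' '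
      == '0') = bitp bits (o + j) := by
  rw [show ((o : Int) + (j : Int)) = ((o + j : Nat) : Int) by push_cast; ring,
    PySem.Int.mod_natCast, PySem.List.pyGet?_natCast, bitp, List.getD_eq_getElem?_getD]

lemma permB_cast (bits : List Char) (N o : Nat) :
    permB bits (bits.length : Int) (N : Int) (o : Int) = castL (permN bits N o) := by
  unfold permB permN castL
  rw [PySem.List.pyRange_zero_natCast, List.filter_map, List.filter_map, List.map_append]
  congr 2 <;> apply List.filter_congr <;> intro j _ <;>
    simp only [Function.comp_apply, bit_pred_cast]

lemma foldl_castL {β : Type} {f : List Int → β → List Int} {g : List Nat → β → List Nat}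
    (h : ∀ a x, f (castL a) x = castL (g a x)) (l : List β) (a0 : List Nat) :
    List.foldl f (castL a0) l = castL (List.foldl g a0 l) := by
  induction l generalizing a0 with
  | nil => rfl
  | cons x l ih => rw [List.foldl_cons, List.foldl_cons, h, ih]

lemma powB_cast (e : Nat) (P b : List Nat) :
    powB (castL P) (castL b) e = castL (powN P b e) := by
  induction e using Nat.strong_induction_on generalizing P b with
  | _ e ih =>
    rw [powB, powN]
    by_cases h : e = 0
    · simp [h]
    · rw [dif_neg h, dif_neg h]
      split_ifs with hodd
      · rw [composeB_cast, composeB_cast,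
          ih (e / 2) (Nat.div_lt_self (Nat.pos_of_ne_zero h) one_lt_two)]
      · rw [composeB_cast, ih (e / 2) (Nat.div_lt_self (Nat.pos_of_ne_zero h) one_lt_two)]

lemma Bfold_cast (bits : List Char) (N m : Nat) :
    (PySem.List.pyRange 0 (m : Int) 1).foldl
      (fun Q j => composeB Q (permB bits (bits.length : Int) (N : Int)
        (PySem.Int.mod (j * (N : Int)) (bits.length : Int))))
      (PySem.List.pyRange 0 (N : Int) 1)
      = castL (chainS bits N 0 m) := by
  rw [PySem.List.pyRange_zero_natCast m, List.foldl_map, ← castL_range, chainS]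
  apply foldl_castL
  intro a j
  rw [show ((j : Nat) : Int) * (N : Int) = ((j * N : Nat) : Int) by push_cast; ring,
    PySem.Int.mod_natCast, permB_cast, composeB_cast, permN_mod,
    show (0 + j) * N = j * N by ring]

-- A's round, bridged to the Nat model
lemma ksa_round_cast (bits : List Char) (N : Nat) (a : List Nat) (r : Nat) :
    ((List.map (Nat.cast : Nat → Int) (List.range N)).foldl (fun (tb : List Int × List Int) i =>
      if (PySem.List.pyGet? bits (PySem.Int.mod ((r : Int) * (N : Int) + i)
            ((bits.length : Int)))).getD ' ' == '0'
      then (tb.1 ++ [(PySem.List.pyGet? (List.map (Nat.cast : Nat → Int) a) i).getD 0], tb.2)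
      else (tb.1, tb.2 ++ [(PySem.List.pyGet? (List.map (Nat.cast : Nat → Int) a) i).getD 0]))
      (([] : List Int), ([] : List Int))).1
    ++ ((List.map (Nat.cast : Nat → Int) (List.range N)).foldl (fun (tb : List Int × List Int) i =>
      if (PySem.List.pyGet? bits (PySem.Int.mod ((r : Int) * (N : Int) + i)
            ((bits.length : Int)))).getD ' ' == '0'
      then (tb.1 ++ [(PySem.List.pyGet? (List.map (Nat.cast : Nat → Int) a) i).getD 0], tb.2)
      else (tb.1, tb.2 ++ [(PySem.List.pyGet? (List.map (Nat.cast : Nat → Int) a) i).getD 0]))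
      (([] : List Int), ([] : List Int))).2
    = List.map (Nat.cast : Nat → Int) (compN a (permN bits N (r * N))) := by
  rw [List.foldl_map]
  have hstep : (fun (tb : List Int × List Int) (i : Nat) =>
      if (PySem.List.pyGet? bits (PySem.Int.mod ((r : Int) * (N : Int) + (i : Int))
            ((bits.length : Int)))).getD ' ' == '0'
      then (tb.1 ++ [(PySem.List.pyGet? (List.map (Nat.cast : Nat → Int) a) (i : Int)).getD 0], tb.2)
      else (tb.1, tb.2 ++ [(PySem.List.pyGet? (List.map (Nat.cast : Nat → Int) a) (i : Int)).getD 0]))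
      = fun tb i =>
        (if bitp bits (r * N + i) then tb.1 ++ [((a.getD i 0 : Nat) : Int)] else tb.1,
         if !bitp bits (r * N + i) then tb.2 ++ [((a.getD i 0 : Nat) : Int)] else tb.2) := by
    funext tb i
    rw [show (r : Int) * (N : Int) + (i : Int) = ((r * N : Nat) : Int) + (i : Int) by
        push_cast; ring,
      bit_pred_cast bits (r * N) i, pyGetD_map_cast]
    by_cases hb : bitp bits (r * N + i) <;> simp [hb]
  rw [hstep, PySem.List.foldl_prod_mk
      (f := fun acc i => if bitp bits (r * N + i) then acc ++ [((a.getD i 0 : Nat) : Int)] else acc)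
      (g := fun acc i => if !bitp bits (r * N + i) then acc ++ [((a.getD i 0 : Nat) : Int)] else acc)]
  rw [PySem.List.foldl_append_if, PySem.List.foldl_append_if]
  simp [compN, permN, List.map_map, Function.comp_def]

lemma length_str2binL (key : String) : (str2binL key).length = 8 * key.toList.length := by
  unfold str2binL
  rw [List.length_flatMap]
  simp [mul_comm]

lemma ksa_rs_eq_chain (key : String) (N T : Nat) :
    ksa_rs key (N : Int) (T : Int) = castL (chainS (str2binL key) N 0 T) := by
  unfold ksa_rs
  rw [PySem.List.pyRange_zero_natCast T, List.foldl_map, ← castL_range N, chainS]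
  apply foldl_castL
  intro a r
  beta_reduce
  rw [show (0 + r) * N = r * N by ring]
  exact ksa_round_cast (str2binL key) N a r

lemma divmod_natCast {T P : Nat} (hP : 0 < P) :
    PySem.Int.divmod? (T : Int) (P : Int) = some (((T / P : Nat) : Int), ((T % P : Nat) : Int)) := by
  unfold PySem.Int.divmod?
  rw [if_neg (by exact_mod_cast hP.ne'), ← Int.ofNat_fdiv, ← Int.ofNat_fmod]

-- B's main branch, bridged to the Nat model
lemma ksa_rs_alt_eq (key : String) (N T : Nat) (hN : 0 < N) (hT : 0 < T)
    (hL : 0 < (str2binL key).length) :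
    ksa_rs_alt key (N : Int) (T : Int)
      = castL (compN
          (powN (List.range N)
            (chainS (str2binL key) N 0 ((str2binL key).length / Nat.gcd N (str2binL key).length))
            (T / ((str2binL key).length / Nat.gcd N (str2binL key).length)))
          (chainS (str2binL key) N 0
            (T % ((str2binL key).length / Nat.gcd N (str2binL key).length)))) := by
  have hg : 0 < Nat.gcd N (str2binL key).length := Nat.gcd_pos_of_pos_right N hL
  have hP : 0 < (str2binL key).length / Nat.gcd N (str2binL key).length :=
    Nat.div_pos (Nat.le_of_dvd hL (Nat.gcd_dvd_right _ _)) hg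
  unfold ksa_rs_alt
  rw [if_neg (by push_neg; constructor <;> [exact_mod_cast hT; exact_mod_cast hN])]
  simp only [Int.gcd_natCast_natCast, PySem.Int.floordiv_natCast, divmod_natCast hP,
    Int.toNat_natCast]
  by_cases hq : 0 < T / ((str2binL key).length / Nat.gcd N (str2binL key).length)
  · rw [if_pos (by exact_mod_cast hq)]
    rw [Bfold_cast, Bfold_cast, ← castL_range N, powB_cast, composeB_cast]
  · rw [if_neg (by exact_mod_cast hq)]
    have hq0 : T / ((str2binL key).length / Nat.gcd N (str2binL key).length) = 0 := Nat.eq_zero_of_not_pos hq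
    rw [Bfold_cast, ← castL_range N, composeB_cast, hq0]
    have : powN (List.range N)
        (chainS (str2binL key) N 0 ((str2binL key).length / Nat.gcd N (str2binL key).length))
        0 = List.range N := by rw [powN]; simp
    rw [this]

lemma foldl_const_nil {α : Type} {f : List Int → α → List Int}
    (h : ∀ s r, f s r = []) : ∀ (l : List α) (s0 : List Int), l ≠ [] →
    List.foldl f s0 l = [] := by
  intro l
  induction l with
  | nil => intro s0 hl; exact absurd rfl hl
  | cons x l ih =>
      intro s0 _
      rw [List.foldl_cons]
      cases l with
      | nil => simpa using h s0 x
      | cons y l' => exact ih _ (by simp)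

-- L divides P*N for P = L / gcd N L
lemma dvd_PN (N L : Nat) : L ∣ (L / Nat.gcd N L) * N := by
  rcases Nat.eq_zero_or_pos (Nat.gcd N L) with hg | hg
  · have hL0 : L = 0 := Nat.eq_zero_of_gcd_eq_zero_right hg
    subst hL0; simp
  · set g := Nat.gcd N L with hgdef
    obtain ⟨n2, hn2⟩ : g ∣ N := Nat.gcd_dvd_left N L
    obtain ⟨l2, hl2⟩ : g ∣ L := Nat.gcd_dvd_right N L
    refine ⟨n2, ?_⟩
    rw [hn2, hl2, Nat.mul_div_cancel_left _ hg]
    ring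

-- ===== VERDICT (by name: the statement is the Claim_ definition above) =====
theorem ksa_rs_spec : Claim_equal_ksa_rs := by
  intro key n t _ hpre
  unfold Spec_ksa_rs
  by_cases ht : t ≤ 0
  · unfold ksa_rs ksa_rs_alt
    rw [if_pos (Or.inl ht), PySem.List.pyRange_one_eq_nil ht]
    rfl
  · by_cases hn : n ≤ 0
    · unfold ksa_rs ksa_rs_alt
      rw [if_pos (Or.inr hn)]
      rw [PySem.List.pyRange_one_eq_nil hn]
      refine foldl_const_nil (fun s r => rfl) _ _ ?_
      have hmem : (0 : Int) ∈ PySem.List.pyRange 0 t 1 :=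
        PySem.List.mem_pyRange_one.mpr ⟨le_refl 0, by omega⟩
      intro hc
      rw [hc] at hmem
      simp at hmem
    · push_neg at ht hn
      have hkey : key ≠ "" := by
        intro hk
        rcases hpre hk with h | h <;> omega
      have hL : 0 < (str2binL key).length := by
        rw [length_str2binL]
        have hne : key.toList ≠ [] := by
          intro hc
          apply hkey
          have := congrArg String.ofList hc
          simpa using this
        have := List.length_pos_of_ne_nil hne
        omega
      obtain ⟨N, rfl⟩ : ∃ N : Nat, n = (N : Int) := ⟨n.toNat, (Int.toNat_of_nonneg hn.le).symm⟩
      obtain ⟨T, rfl⟩ : ∃ T : Nat, t = (T : Int) := ⟨t.toNat, (Int.toNat_of_nonneg ht.le).symm⟩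
      have hNpos : 0 < N := by exact_mod_cast hn
      have hTpos : 0 < T := by exact_mod_cast ht
      rw [ksa_rs_eq_chain, ksa_rs_alt_eq key N T hNpos hTpos hL]
      congr 1
      have hQ : GoodN N (chainS (str2binL key) N 0
          ((str2binL key).length / Nat.gcd N (str2binL key).length)) :=
        good_chainS _ _ _ _
      rw [powN_eq _ (good_range N) hQ, compN_id_left (good_cpowN hQ _).2]
      conv_lhs => rw [show T = T / ((str2binL key).length / Nat.gcd N (str2binL key).length)
            * ((str2binL key).length / Nat.gcd N (str2binL key).length)
          + T % ((str2binL key).length / Nat.gcd N (str2binL key).length) from by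
        rw [Nat.mul_comm]
        exact (Nat.div_add_mod T _).symm]
      rw [chain_decomp (dvd_PN N (str2binL key).length)]
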